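-- pv_equiv track=rewrite | github.com/namehash/ens-label-inspector | label_inspector/downloader/download_myunicode.py | ranges_to_bisect
-- ===== SOURCE A (Python) =====
-- from typing import List, Tuple, Any, Iterable
--
-- def ranges_to_bisect(ranges: List[Tuple[int, int, Any]]) -> List[Tuple[int, Any]]:
--     # ensure proper order for bisect
--     ranges.sort(key=lambda x: x[0])
--
--     # compress continuous ranges
--     compressed = []
--     for r in ranges:
--         # if current script range extends the previous one
--         if len(compressed) > 0 and r[0] == compressed[-1][1] + 1 and r[2] == compressed[-1][2]:
--             # extend last range
--             compressed[-1] = (compressed[-1][0], r[1], compressed[-1][2])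
--         else:
--             # add new range
--             compressed.append(r)
--
--     ranges = compressed
--
--     # convert to bisect format (start, name)
--     starts = [0]
--     names = [None]
--
--     for start, stop, name in ranges:
--         # check if there is a gap between the last range and this one
--         if starts[-1] == start:  # no gap
--             # overwrite previous None range
--             # and remove the gap
--             names[-1] = name
--         else:  # gap
--             # insert new range after previous None range
--             # keeping the gap
--             starts.append(start)
--             names.append(name)
--
--         # assume that this range is the last one
--         # and insert a None range
--         starts.append(stop + 1)
--         names.append(None)
--
--     return list(zip(starts, names))
-- ===== SOURCE B (Python) =====
-- def ranges_to_bisect(ranges):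
--     # ensure proper order for bisect (same in-place sort as the original)
--     ranges.sort(key=lambda x: x[0])
--
--     # single fused pass: keep one running current range and flush it into the
--     # output (a single list of (start, name) pairs) when it cannot be extended
--     out = [(0, None)]
--     cur = None
--     for r in ranges:
--         if cur is not None and r[0] == cur[1] + 1 and r[2] == cur[2]:
--             # extend the running range
--             cur = (cur[0], r[1], cur[2])
--         else:
--             if cur is not None:
--                 _flush(out, cur)
--             cur = r
--     if cur is not None:
--         _flush(out, cur)
--     return out
--
--
-- def _flush(out, cur):
--     start, stop, name = cur
--     if out[-1][0] == start:  # no gap: overwrite the previous None entry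
--         out[-1] = (start, name)
--     else:  # gap: keep it, append a new entry
--         out.append((start, name))
--     out.append((stop + 1, None))
-- ===== Notes on version B (the rewrite author's own statement) =====
-- stated objective: alternative
-- what changed: Replaces A's two passes (build a compressed range list, then convert it into parallel starts/names arrays and zip them) by one fused pass that maintains a single running current range and flushes it directly into one output list of (start,name) pairs.
import Mathlib
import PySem

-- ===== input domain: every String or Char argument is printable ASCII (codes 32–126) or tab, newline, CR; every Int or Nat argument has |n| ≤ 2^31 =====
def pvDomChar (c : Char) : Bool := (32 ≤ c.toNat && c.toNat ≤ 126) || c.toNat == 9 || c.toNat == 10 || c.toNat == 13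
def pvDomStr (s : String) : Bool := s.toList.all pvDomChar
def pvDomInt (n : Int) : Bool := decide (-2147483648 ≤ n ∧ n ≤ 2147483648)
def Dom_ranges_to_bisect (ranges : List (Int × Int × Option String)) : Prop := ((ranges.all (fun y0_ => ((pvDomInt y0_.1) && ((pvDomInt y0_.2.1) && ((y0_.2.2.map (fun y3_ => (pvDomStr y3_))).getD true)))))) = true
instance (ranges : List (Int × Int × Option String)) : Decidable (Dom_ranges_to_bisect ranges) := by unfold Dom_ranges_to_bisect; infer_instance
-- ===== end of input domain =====

-- B fuses A's compress pass and convert pass into one pass over the sorted list that keeps a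
-- running current range and flushes it into a single output list (objective: alternative).
-- Both Pythons sort `ranges` in place (same observable mutation); the equivalence proved here
-- is about the return value.

-- ===== PORT A =====

-- A's compression-loop body: extend the last compressed range or append a new one
def rtbCompStep (acc : List (Int × Int × Option String)) (r : Int × Int × Option String) :
    List (Int × Int × Option String) :=
  match acc.getLast? with
  | some last =>
      if r.1 = last.2.1 + 1 ∧ r.2.2 = last.2.2 then
        acc.dropLast ++ [(last.1, r.2.1, last.2.2)]
      else acc ++ [r]
  | none => acc ++ [r]

-- A's conversion-loop body over the parallel (starts, names) lists
def rtbConvStep (st : List Int × List (Option String)) (r : Int × Int × Option String) :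
    List Int × List (Option String) :=
  let st2 :=
    if st.1.getLast? = some r.1 then (st.1, st.2.dropLast ++ [r.2.2])
    else (st.1 ++ [r.1], st.2 ++ [r.2.2])
  (st2.1 ++ [r.2.1 + 1], st2.2 ++ [none])

def ranges_to_bisect (ranges : List (Int × Int × Option String)) : List (Int × Option String) :=
  let sorted := PySem.List.sorted ranges (fun x => x.1) false
  let compressed := sorted.foldl rtbCompStep []
  let st := compressed.foldl rtbConvStep ([0], [none])
  st.1.zip st.2

-- ===== PORT B =====

-- B's _flush helper: write the finished current range into the output list
def rtbFlush (out : List (Int × Option String)) (cur : Int × Int × Option String) :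
    List (Int × Option String) :=
  let out2 :=
    match out.getLast? with
    | some p =>
        if p.1 = cur.1 then out.dropLast ++ [(cur.1, cur.2.2)]
        else out ++ [(cur.1, cur.2.2)]
    | none => out ++ [(cur.1, cur.2.2)]   -- unreachable: out is never empty
  out2 ++ [(cur.2.1 + 1, none)]

-- B's fused-loop body: extend the running range or flush it and start a new one
def rtbStep (st : List (Int × Option String) × Option (Int × Int × Option String))
    (r : Int × Int × Option String) :
    List (Int × Option String) × Option (Int × Int × Option String) :=
  match st.2 with
  | some c =>
      if r.1 = c.2.1 + 1 ∧ r.2.2 = c.2.2 then (st.1, some (c.1, r.2.1, c.2.2))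
      else (rtbFlush st.1 c, some r)
  | none => (st.1, some r)

def ranges_to_bisect_alt (ranges : List (Int × Int × Option String)) : List (Int × Option String) :=
  let sorted := PySem.List.sorted ranges (fun x => x.1) false
  let st := sorted.foldl rtbStep ([(0, none)], none)
  match st.2 with
  | some c => rtbFlush st.1 c
  | none => st.1

-- ===== PRECONDITION & SPEC =====
def Spec_ranges_to_bisect (ranges : List (Int × Int × Option String)) (out : List (Int × Option String)) : Prop := out = ranges_to_bisect_alt ranges
instance (ranges : List (Int × Int × Option String)) (out : List (Int × Option String)) : Decidable (Spec_ranges_to_bisect ranges out) := by unfold Spec_ranges_to_bisect; infer_instance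

-- ===== CLAIM (what is proved, stated in full; the proofs are below) =====
def Claim_equal_ranges_to_bisect : Prop := ∀ (ranges : List (Int × Int × Option String)), Dom_ranges_to_bisect ranges → Spec_ranges_to_bisect ranges (ranges_to_bisect ranges)

-- ===== LEMMAS AND PROOFS =====

-- compression only ever touches the last element, so a prefix splits off
theorem rtb_comp_split (l : List (Int × Int × Option String))
    (acc : List (Int × Int × Option String)) (c : Int × Int × Option String) :
    l.foldl rtbCompStep (acc ++ [c]) = acc ++ l.foldl rtbCompStep [c] := by
  induction l generalizing acc c with
  | nil => simp
  | cons r l ih =>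
      simp only [List.foldl_cons]
      by_cases h : r.1 = c.2.1 + 1 ∧ r.2.2 = c.2.2
      · have h1 : rtbCompStep (acc ++ [c]) r = acc ++ [(c.1, r.2.1, c.2.2)] := by
          simp [rtbCompStep, h]
        have h2 : rtbCompStep [c] r = [(c.1, r.2.1, c.2.2)] := by
          simp [rtbCompStep, h]
        rw [h1, h2, ih]
      · have h1 : rtbCompStep (acc ++ [c]) r = (acc ++ [c]) ++ [r] := by
          simp [rtbCompStep, h]
        have h2 : rtbCompStep [c] r = [c] ++ [r] := by
          simp [rtbCompStep, h]
        rw [h1, h2, ih, ih]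
        simp

-- one conversion step, seen through zip, is exactly one flush of B
theorem rtb_conv_zip_step (starts : List Int) (names : List (Option String))
    (r : Int × Int × Option String)
    (hlen : starts.length = names.length) (hne : starts ≠ []) :
    (rtbConvStep (starts, names) r).1.zip (rtbConvStep (starts, names) r).2
      = rtbFlush (starts.zip names) r := by
  rcases (starts.eq_nil_or_concat).resolve_left hne with ⟨s', a, rfl⟩
  have hne' : names ≠ [] := by
    intro h; subst h; simp at hlen
  rcases (names.eq_nil_or_concat).resolve_left hne' with ⟨n', b, rfl⟩
  simp only [List.concat_eq_append] at hlen hne hne' ⊢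
  have hl : s'.length = n'.length := by simpa using hlen
  have hz : (s' ++ [a]).zip (n' ++ [b]) = s'.zip n' ++ [(a, b)] :=
    List.zip_append hl
  by_cases h : a = r.1
  · simp [rtbConvStep, rtbFlush, h, List.zip_append, hl]
  · have hgs : (s' ++ [a]).getLast? = some a := List.getLast?_concat
    have hgz : (s'.zip n' ++ [(a, b)]).getLast? = some (a, b) := List.getLast?_concat
    have hl2 : (s' ++ [a] ++ [r.1]).length = (n' ++ [b] ++ [r.2.2]).length := by
      simp [hl]
    simp only [rtbConvStep, rtbFlush, hz, hgs, hgz, Option.some.injEq, h, if_false,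
      List.zip_append hl2]
    simp [List.zip_append hl]

theorem rtb_conv_lengths (starts : List Int) (names : List (Option String))
    (r : Int × Int × Option String) (hlen : starts.length = names.length) :
    (rtbConvStep (starts, names) r).1.length = (rtbConvStep (starts, names) r).2.length
      ∧ (rtbConvStep (starts, names) r).1 ≠ [] := by
  rcases names with _ | ⟨n, ns⟩
  · have : starts = [] := by simpa using List.length_eq_zero_iff.mp (by simpa using hlen)
    subst this
    simp [rtbConvStep]
  · by_cases h : starts.getLast? = some r.1
    · constructor
      · simp [rtbConvStep, h, hlen, List.length_dropLast]
      · simp [rtbConvStep, h]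
    · constructor
      · simp [rtbConvStep, h, hlen]
      · simp [rtbConvStep, h]

-- A's whole conversion fold, seen through zip, is B's flush fold
theorem rtb_conv_zip (l : List (Int × Int × Option String))
    (starts : List Int) (names : List (Option String))
    (hlen : starts.length = names.length) (hne : starts ≠ []) :
    (l.foldl rtbConvStep (starts, names)).1.zip (l.foldl rtbConvStep (starts, names)).2
      = l.foldl rtbFlush (starts.zip names) := by
  induction l generalizing starts names with
  | nil => simp
  | cons r l ih =>
      obtain ⟨hlen', hne'⟩ := rtb_conv_lengths starts names r hlen
      simp only [List.foldl_cons]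
      rw [← rtb_conv_zip_step starts names r hlen hne]
      exact ih _ _ hlen' hne'

-- the fused fold, finalized, equals compressing starting from the optional current
-- range and then flushing every compressed range
theorem rtb_fused (l : List (Int × Int × Option String))
    (out : List (Int × Option String)) (cur : Option (Int × Int × Option String)) :
    (match (l.foldl rtbStep (out, cur)).2 with
      | some c => rtbFlush (l.foldl rtbStep (out, cur)).1 c
      | none => (l.foldl rtbStep (out, cur)).1)
      = (l.foldl rtbCompStep cur.toList).foldl rtbFlush out := by
  induction l generalizing out cur with
  | nil =>
      rcases cur with _ | c <;> simp
  | cons r l ih =>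
      rcases cur with _ | c
      · simp only [List.foldl_cons, rtbStep]
        rw [ih]
        have : rtbCompStep ([] : List (Int × Int × Option String)) r = [r] := by
          simp [rtbCompStep]
        simp [this]
      · by_cases h : r.1 = c.2.1 + 1 ∧ r.2.2 = c.2.2
        · have hs : rtbStep (out, some c) r = (out, some (c.1, r.2.1, c.2.2)) := by
            simp [rtbStep, h]
          have hc : rtbCompStep [c] r = [(c.1, r.2.1, c.2.2)] := by
            simp [rtbCompStep, h]
          simp only [List.foldl_cons, hs, hc, Option.toList_some]
          exact ih out (some (c.1, r.2.1, c.2.2))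
        · have hs : rtbStep (out, some c) r = (rtbFlush out c, some r) := by
            simp [rtbStep, h]
          have hc : rtbCompStep [c] r = [c] ++ [r] := by
            simp [rtbCompStep, h]
          simp only [List.foldl_cons, hs, hc, Option.toList_some]
          rw [ih, rtb_comp_split]
          simp

-- ===== VERDICT (by name: the statement is the Claim_ definition above) =====
theorem ranges_to_bisect_spec : Claim_equal_ranges_to_bisect := by
  intro ranges _
  unfold Spec_ranges_to_bisect ranges_to_bisect ranges_to_bisect_alt
  simp only []
  rw [rtb_conv_zip _ [0] [none] rfl (by simp)]
  rw [rtb_fused _ [(0, none)] none]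
  simp
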